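-- pv_equiv track=rewrite | github.com/sjpkorea/xython.github.io | xython/pynal.py | make_time_list_for_hsm_list_by_step_cycle
-- ===== SOURCE A (Python) =====
-- def make_time_list_for_hsm_list_by_step_cycle(start_hsm_list, step=30, cycle=20):
-- 	"""
--
-- 	:param start_hsm_list:
-- 	:param step:
-- 	:param cycle:
-- 	:return:
-- 	시작과 종료시간을 입력하면, 30분간격으로 시간목록을 자동으로 생성시키는것
-- 	"""
-- 	result = []
-- 	hour, min, sec = start_hsm_list
-- 	result.append([hour, min, sec])
-- 	for one in range(cycle):
-- 		min = min + step
-- 		over_min, min = divmod(min, 60)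
-- 		if over_min > 0:
-- 			hour = hour + over_min
-- 		hour = divmod(hour, 24)[1]
-- 		result.append([hour, min, sec])
-- 	return result
-- ===== SOURCE B (Python) =====
-- def make_time_list_for_hsm_list_by_step_cycle(start_hsm_list, step=30, cycle=20):
--     """Time list at fixed step intervals; each entry computed directly from its index."""
--     hour, minute, sec = start_hsm_list
--     result = [[hour, minute, sec]]
--     for i in range(1, cycle + 1):
--         total = minute + i * step
--         result.append([(hour + total // 60) % 24, total % 60, sec])
--     return result
-- ===== Notes on version B (the rewrite author's own statement) =====
-- stated objective: alternative
-- what changed: Replaced A's running minute/hour carry-chain state machine with a stateless closed form computed independently per index (total = minute + i*step; entry i = [(hour + total//60) % 24, total % 60, sec]); Pre_ excludes backward stepping (cycle >= 1 with step < 0, or a start minute that goes negative at the first step), where A's dropping of negative hour carries is an accident of its implementation.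
-- outside the precondition, e.g. on make_time_list_for_hsm_list_by_step_cycle([10, 15, 0], -30, 1): A returns [[10, 15, 0], [10, 45, 0]], B returns [[10, 15, 0], [9, 45, 0]]
import Mathlib
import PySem

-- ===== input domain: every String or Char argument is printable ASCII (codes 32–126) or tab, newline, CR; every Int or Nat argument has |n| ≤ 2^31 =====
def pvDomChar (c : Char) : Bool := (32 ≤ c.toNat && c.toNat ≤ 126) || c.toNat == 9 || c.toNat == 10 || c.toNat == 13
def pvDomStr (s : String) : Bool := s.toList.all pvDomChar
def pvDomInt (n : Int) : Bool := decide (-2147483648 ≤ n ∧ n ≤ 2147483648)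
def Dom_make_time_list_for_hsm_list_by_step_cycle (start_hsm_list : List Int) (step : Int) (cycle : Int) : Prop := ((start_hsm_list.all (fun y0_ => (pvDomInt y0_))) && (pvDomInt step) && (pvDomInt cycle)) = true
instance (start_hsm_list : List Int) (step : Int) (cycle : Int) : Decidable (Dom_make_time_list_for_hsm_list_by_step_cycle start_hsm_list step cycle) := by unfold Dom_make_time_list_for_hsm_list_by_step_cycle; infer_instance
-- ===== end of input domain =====

-- B computes each entry by a stateless closed form per index instead of A's running minute/hour carry chain
-- (alternative decomposition, same cost); backward stepping is excluded by Pre_ (see the comment there).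

-- ===== PORT A =====
-- loop body of A's 'for one in range(cycle)' (state = (hour, min, result));
-- divmod(min, 60) = (floordiv min 60, mod min 60) exactly (60 ≠ 0), divmod(hour, 24)[1] = mod hour 24
def pvA_body (step sec : Int) (s : Int × Int × List (List Int)) : Int × Int × List (List Int) :=
  let (hour, min, result) := s
  let min := min + step
  let over_min := PySem.Int.floordiv min 60
  let min := PySem.Int.mod min 60
  let hour := if over_min > 0 then hour + over_min else hour
  let hour := PySem.Int.mod hour 24
  (hour, min, result ++ [[hour, min, sec]])

def make_time_list_for_hsm_list_by_step_cycle (start_hsm_list : List Int) (step : Int) (cycle : Int) : List (List Int) :=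
  match start_hsm_list with
  | [hour, min, sec] =>
    let result := [[hour, min, sec]]
    let s := (PySem.List.pyRange 0 cycle 1).foldl (fun s _ => pvA_body step sec s) (hour, min, result)
    s.2.2
  | _ => []  -- tuple unpacking raises for any other length; excluded by Pre_

-- ===== PORT B =====
-- tuple unpacking 'hour, minute, sec = start_hsm_list' ported as a length-3 check plus indexing
-- (exact: unpacking succeeds iff the list has exactly 3 elements)
def make_time_list_for_hsm_list_by_step_cycle_alt (start_hsm_list : List Int) (step : Int) (cycle : Int) : List (List Int) :=
  if h : start_hsm_list.length = 3 then
    let hour := start_hsm_list[0]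
    let minute := start_hsm_list[1]
    let sec := start_hsm_list[2]
    [[hour, minute, sec]] ++ (PySem.List.pyRange 1 (cycle + 1) 1).map (fun i =>
      let total := minute + i * step
      [PySem.Int.mod (hour + PySem.Int.floordiv total 60) 24, PySem.Int.mod total 60, sec])
  else []  -- tuple unpacking raises for any other length; excluded by Pre_

-- ===== PRECONDITION & SPEC =====
-- Pre_ admits lists of length 3 (any other length raises ValueError on tuple unpacking) and excludes backward
-- stepping (cycle ≥ 1 with step < 0, or a start minute that goes negative at the first step): the function
-- generates forward time slots (default step 30), and A's value there — it drops every negative hour carry, so the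
-- hour never moves backwards while the minutes do — is an accident of its implementation; B returns the true
-- earlier time on those inputs.
def Pre_make_time_list_for_hsm_list_by_step_cycle (start_hsm_list : List Int) (step : Int) (cycle : Int) : Prop :=
  start_hsm_list.length = 3 ∧ (1 ≤ cycle → 0 ≤ step ∧ 0 ≤ start_hsm_list.getD 1 0 + step)
instance (start_hsm_list : List Int) (step : Int) (cycle : Int) : Decidable (Pre_make_time_list_for_hsm_list_by_step_cycle start_hsm_list step cycle) := by unfold Pre_make_time_list_for_hsm_list_by_step_cycle; infer_instance

def pvWitness_make_time_list_for_hsm_list_by_step_cycle : List Int × Int × Int := ([9, 45, 0], 30, 3)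

def Spec_make_time_list_for_hsm_list_by_step_cycle (start_hsm_list : List Int) (step : Int) (cycle : Int) (out : List (List Int)) : Prop := out = make_time_list_for_hsm_list_by_step_cycle_alt start_hsm_list step cycle
instance (start_hsm_list : List Int) (step : Int) (cycle : Int) (out : List (List Int)) : Decidable (Spec_make_time_list_for_hsm_list_by_step_cycle start_hsm_list step cycle out) := by unfold Spec_make_time_list_for_hsm_list_by_step_cycle; infer_instance

-- ===== CLAIM (what is proved, stated in full; the proofs are below) =====
def Claim_equal_make_time_list_for_hsm_list_by_step_cycle : Prop := ∀ (start_hsm_list : List Int) (step : Int) (cycle : Int), Dom_make_time_list_for_hsm_list_by_step_cycle start_hsm_list step cycle → Pre_make_time_list_for_hsm_list_by_step_cycle start_hsm_list step cycle → Spec_make_time_list_for_hsm_list_by_step_cycle start_hsm_list step cycle (make_time_list_for_hsm_list_by_step_cycle start_hsm_list step cycle)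

-- ===== LEMMAS AND PROOFS =====

-- closed-form state after k iterations of A's loop (outside D_)
def pvM (min0 step : Int) : Nat → Int
  | 0 => min0
  | k + 1 => PySem.Int.mod (min0 + ((k : Int) + 1) * step) 60

def pvH (hour0 min0 step : Int) : Nat → Int
  | 0 => hour0
  | k + 1 => PySem.Int.mod (hour0 + PySem.Int.floordiv (min0 + ((k : Int) + 1) * step) 60) 24

def pvElem (hour0 min0 sec step : Int) (i : Int) : List Int :=
  [PySem.Int.mod (hour0 + PySem.Int.floordiv (min0 + i * step) 60) 24,
   PySem.Int.mod (min0 + i * step) 60, sec]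

def pvR (hour0 min0 sec step : Int) (k : Nat) : List (List Int) :=
  [[hour0, min0, sec]] ++ (PySem.List.pyRange 1 ((k : Int) + 1) 1).map (pvElem hour0 min0 sec step)

lemma pv_mod60 (a : Int) : PySem.Int.mod a 60 = a % 60 := PySem.Int.mod_eq_emod_of_pos (by norm_num)
lemma pv_mod24 (a : Int) : PySem.Int.mod a 24 = a % 24 := PySem.Int.mod_eq_emod_of_pos (by norm_num)
lemma pv_div60 (a : Int) : PySem.Int.floordiv a 60 = a / 60 := PySem.Int.floordiv_eq_ediv_of_pos (by norm_num)

lemma pv_fold_const {α β : Type} (g : α → α) (l : List β) (s : α) :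
    l.foldl (fun s _ => g s) s = g^[l.length] s := by
  induction l generalizing s with
  | nil => simp
  | cons x xs ih => simp [List.foldl, ih, Function.iterate_succ_apply]

lemma pv_min_step (min0 step : Int) (k : Nat) :
    PySem.Int.mod (pvM min0 step k + step) 60 = pvM min0 step (k + 1) := by
  cases k with
  | zero => simp only [pvM]; congr 1; push_cast; ring
  | succ s =>
    simp only [pvM, pv_mod60]
    push_cast
    have h1 : min0 + ((s : Int) + 1) * step = (min0 + step) + (s : Int) * step := by ring
    have h2 : min0 + ((s : Int) + 1 + 1) * step = ((min0 + step) + (s : Int) * step) + step := by ring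
    rw [h1, h2]
    generalize (min0 + step) + (s : Int) * step = X
    omega

lemma pv_hour_step (hour0 min0 step : Int) (k : Nat)
    (hcar : 0 ≤ PySem.Int.floordiv (pvM min0 step k + step) 60) :
    PySem.Int.mod
      (if PySem.Int.floordiv (pvM min0 step k + step) 60 > 0
       then pvH hour0 min0 step k + PySem.Int.floordiv (pvM min0 step k + step) 60
       else pvH hour0 min0 step k) 24 = pvH hour0 min0 step (k + 1) := by
  cases k with
  | zero =>
    simp only [pvM, pvH, pv_mod24, pv_div60] at *
    push_cast
    split_ifs <;> omega
  | succ s =>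
    simp only [pvM, pvH, pv_mod60, pv_mod24, pv_div60] at *
    push_cast at *
    have h2 : min0 + ((s : Int) + 1 + 1) * step = (min0 + ((s : Int) + 1) * step) + step := by ring
    rw [h2] at *
    generalize hM : min0 + ((s : Int) + 1) * step = M at *
    split_ifs <;> omega

lemma pv_elem_eq (hour0 min0 sec step : Int) (k : Nat) :
    pvElem hour0 min0 sec step ((k : Int) + 1)
      = [pvH hour0 min0 step (k + 1), pvM min0 step (k + 1), sec] := by
  simp only [pvElem, pvH, pvM]

lemma pv_R_step (hour0 min0 sec step : Int) (k : Nat) :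
    pvR hour0 min0 sec step k
        ++ [[pvH hour0 min0 step (k + 1), pvM min0 step (k + 1), sec]]
      = pvR hour0 min0 sec step (k + 1) := by
  unfold pvR
  have hc : ((k + 1 : Nat) : Int) + 1 = ((k : Int) + 1) + 1 := by push_cast; ring
  rw [hc, PySem.List.pyRange_one_succ_right (by omega : (1 : Int) ≤ (k : Int) + 1)]
  simp [pv_elem_eq]

lemma pv_step (hour0 min0 sec step : Int) (k : Nat)
    (hcar : 0 ≤ PySem.Int.floordiv (pvM min0 step k + step) 60) :
    pvA_body step sec (pvH hour0 min0 step k, pvM min0 step k, pvR hour0 min0 sec step k)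
      = (pvH hour0 min0 step (k + 1), pvM min0 step (k + 1), pvR hour0 min0 sec step (k + 1)) := by
  simp only [pvA_body]
  rw [pv_hour_step hour0 min0 step k hcar, pv_min_step, pv_R_step]

lemma pv_iter (hour0 min0 sec step : Int) (n : Nat)
    (hc : ∀ k < n, 0 ≤ PySem.Int.floordiv (pvM min0 step k + step) 60) :
    (pvA_body step sec)^[n] (hour0, min0, [[hour0, min0, sec]])
      = (pvH hour0 min0 step n, pvM min0 step n, pvR hour0 min0 sec step n) := by
  induction n with
  | zero => simp [pvH, pvM, pvR]
  | succ n ih =>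
    rw [Function.iterate_succ_apply', ih (fun k hk => hc k (by omega)),
        pv_step hour0 min0 sec step n (hc n (by omega))]

-- ===== VERDICT (by name: the statement is the Claim_ definition above) =====
theorem make_time_list_for_hsm_list_by_step_cycle_spec : Claim_equal_make_time_list_for_hsm_list_by_step_cycle := by
  intro l step cycle _ hpre
  unfold Spec_make_time_list_for_hsm_list_by_step_cycle
  obtain ⟨hlen, hfwd⟩ := hpre
  match l, hlen with
  | [hour0, min0, sec], _ =>
    unfold make_time_list_for_hsm_list_by_step_cycle make_time_list_for_hsm_list_by_step_cycle_alt
    rw [dif_pos (by simp)]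
    dsimp only [List.getElem_cons_zero, List.getElem_cons_succ]
    rw [pv_fold_const]
    by_cases hc : cycle ≤ 0
    · rw [PySem.List.pyRange_one_eq_nil hc, PySem.List.pyRange_one_eq_nil (by omega : cycle + 1 ≤ 1)]
      simp
    · obtain ⟨hs, hm⟩ := hfwd (by omega)
      have hm' : (0 : Int) ≤ min0 + step := by simpa using hm
      have hcarry : ∀ k < cycle.toNat, 0 ≤ PySem.Int.floordiv (pvM min0 step k + step) 60 := by
        intro k _
        cases k with
        | zero =>
          simp only [pvM, pv_div60]
          omega
        | succ t =>
          simp only [pvM, pv_div60, pv_mod60]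
          generalize min0 + ((t : Int) + 1) * step = M
          omega
      have hlen' : (PySem.List.pyRange 0 cycle 1).length = cycle.toNat := by
        rw [PySem.List.length_pyRange_one]; omega
      rw [hlen', pv_iter hour0 min0 sec step cycle.toNat hcarry]
      show pvR hour0 min0 sec step cycle.toNat = _
      unfold pvR
      have hcast : ((cycle.toNat : Int) + 1) = cycle + 1 := by omega
      rw [hcast]
      rfl
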